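-- pv_equiv track=rewrite | github.com/halimyu/Python1 | HW13/nChoose2.py | nChoose2
-- ===== SOURCE A (Python) =====
-- def nChoose2(n):
--
--     values = n
--     accumlator = 0
--     for i in range(1, n):
--         for j in range(values-1):
--             accumlator += 1
--
--         values -= 1
--
--     return accumlator
-- ===== SOURCE B (Python) =====
-- def nChoose2(n):
--     return n * (n - 1) // 2 if n > 1 else 0
-- ===== Notes on version B (the rewrite author's own statement) =====
-- stated objective: faster
-- what changed: Replaced the doubly nested counting loops with the closed-form triangular-number formula, clamped to zero for small arguments.
import Mathlib
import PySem

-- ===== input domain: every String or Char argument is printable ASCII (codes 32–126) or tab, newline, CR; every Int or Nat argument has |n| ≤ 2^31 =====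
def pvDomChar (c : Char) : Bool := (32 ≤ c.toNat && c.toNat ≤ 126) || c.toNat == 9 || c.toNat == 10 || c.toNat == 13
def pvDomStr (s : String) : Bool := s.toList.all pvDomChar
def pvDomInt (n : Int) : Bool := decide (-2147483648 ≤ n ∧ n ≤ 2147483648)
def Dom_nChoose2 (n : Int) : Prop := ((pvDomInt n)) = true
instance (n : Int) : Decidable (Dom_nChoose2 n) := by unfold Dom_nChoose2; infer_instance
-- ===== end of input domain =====

-- B replaces A's doubly nested counting loops by the closed-form triangular-number formula (clamped to zero for small arguments): measurably faster.

-- ===== PORT A =====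
-- state (values, accumlator); inner loop adds 1 per iteration of range(values-1)
def nChoose2 (n : Int) : Int :=
  ((PySem.List.pyRange 1 n 1).foldl
    (fun (st : Int × Int) _ =>
      (st.1 - 1,
       (PySem.List.pyRange 0 (st.1 - 1) 1).foldl (fun a _ => a + 1) st.2))
    (n, 0)).2

-- ===== PORT B =====
def nChoose2_alt (n : Int) : Int :=
  if n > 1 then PySem.Int.floordiv (n * (n - 1)) 2 else 0

-- ===== PRECONDITION & SPEC =====
def Spec_nChoose2 (n : Int) (out : Int) : Prop := out = nChoose2_alt n
instance (n : Int) (out : Int) : Decidable (Spec_nChoose2 n out) := by unfold Spec_nChoose2; infer_instance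

-- ===== CLAIM (what is proved, stated in full; the proofs are below) =====
def Claim_equal_nChoose2 : Prop := ∀ (n : Int), Dom_nChoose2 n → Spec_nChoose2 n (nChoose2 n)

-- ===== LEMMAS AND PROOFS =====

-- triangle numbers, recursive form
def pvTri : Nat → Nat
  | 0 => 0
  | k + 1 => (k + 1) + pvTri k

theorem pvTri_eq (k : Nat) : pvTri k = k * (k + 1) / 2 := by
  induction k with
  | zero => rfl
  | succ k ih =>
    obtain ⟨m, hm⟩ := Nat.even_mul_succ_self k
    have h2 : (k + 1) * (k + 1 + 1) = 2 * m + 2 * (k + 1) :=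
      calc (k + 1) * (k + 1 + 1) = k * (k + 1) + 2 * (k + 1) := by ring
        _ = 2 * m + 2 * (k + 1) := by omega
    simp only [pvTri, ih]
    omega

-- the inner loop adds the length of the range
theorem foldl_add_one (l : List Int) : ∀ (a : Int), l.foldl (fun a _ => a + 1) a = a + l.length := by
  induction l with
  | nil => intro a; simp
  | cons x xs ih => intro a; simp [List.foldl, ih]; ring

-- the outer loop, parametrised by an arbitrary list (the body ignores the element)
theorem pvOuter (l : List Int) : ∀ (a : Int),
    (l.foldl
      (fun (st : Int × Int) _ =>
        (st.1 - 1,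
         (PySem.List.pyRange 0 (st.1 - 1) 1).foldl (fun a _ => a + 1) st.2))
      (((l.length : Int) + 1), a)).2 = a + (pvTri l.length : Int) := by
  induction l with
  | nil => intro a; simp [pvTri]
  | cons x xs ih =>
    intro a
    simp only [List.foldl, List.length_cons, Nat.cast_add, Nat.cast_one]
    have hlen : ((PySem.List.pyRange 0 ((xs.length : Int) + 1 + 1 - 1) 1).length : Int)
        = (xs.length : Int) + 1 := by
      rw [PySem.List.length_pyRange_one]; omega
    have hin : (PySem.List.pyRange 0 ((xs.length : Int) + 1 + 1 - 1) 1).foldl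
        (fun a _ => a + 1) a = a + ((xs.length : Int) + 1) := by
      rw [foldl_add_one, hlen]
    have harg : ((xs.length : Int) + 1 + 1 - 1) = (xs.length : Int) + 1 := by omega
    rw [show ((xs.length : Int) + 1 + 1 - 1, (PySem.List.pyRange 0 ((xs.length : Int) + 1 + 1 - 1) 1).foldl (fun a _ => a + 1) a)
        = (((xs.length : Int) + 1), a + ((xs.length : Int) + 1)) from by rw [hin, harg]]
    rw [ih]
    simp [pvTri]
    ring

-- ===== VERDICT (by name: the statement is the Claim_ definition above) =====
theorem nChoose2_spec : Claim_equal_nChoose2 := by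
  intro n _
  unfold Spec_nChoose2 nChoose2 nChoose2_alt
  by_cases h : n > 1
  · -- n ≥ 2 : let k = (n-1).toNat
    obtain ⟨k, hk⟩ : ∃ k : Nat, n = (k : Int) + 1 := ⟨(n - 1).toNat, by omega⟩
    have hlen : ((PySem.List.pyRange 1 n 1).length : Int) + 1 = n := by
      rw [PySem.List.length_pyRange_one]; omega
    have hlenNat : (PySem.List.pyRange 1 n 1).length = k := by omega
    have := pvOuter (PySem.List.pyRange 1 n 1) 0
    rw [hlen, hlenNat] at this
    rw [this]
    have hmul : n * (n - 1) = ((k * (k + 1) : Nat) : Int) := by push_cast; rw [hk]; ring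
    rw [if_pos h, hmul]
    rw [show ((2 : Int) = ((2 : Nat) : Int)) from rfl, PySem.Int.floordiv_natCast]
    rw [pvTri_eq]
    simp
  · -- n ≤ 1 : empty range, 0 = 0
    rw [PySem.List.pyRange_one_eq_nil (by omega), if_neg h]
    simp
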